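-- pv_equiv track=rewrite | github.com/UchechiUcheAjike/CSE111-codes | esteem.py | computeNegative
-- ===== SOURCE A (Python) =====
-- def computeNegative(n_list):
--   total = 0
--   for item in n_list:
--     if item == 'D':
--       answer = 3
--     elif item == 'd':
--       answer = 2
--     elif item == 'a':
--       answer = 1
--     else:
--       answer = 0
--     total += answer
--   return total
-- ===== SOURCE B (Python) =====
-- def computeNegative(n_list):
--   return n_list.count('D') * 3 + n_list.count('d') * 2 + n_list.count('a')
-- ===== Notes on version B (the rewrite author's own statement) =====
-- stated objective: simpler
-- what changed: Replaced the accumulator loop with an if/elif cascade by a weighted sum of three list.count scans.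
import Mathlib
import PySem

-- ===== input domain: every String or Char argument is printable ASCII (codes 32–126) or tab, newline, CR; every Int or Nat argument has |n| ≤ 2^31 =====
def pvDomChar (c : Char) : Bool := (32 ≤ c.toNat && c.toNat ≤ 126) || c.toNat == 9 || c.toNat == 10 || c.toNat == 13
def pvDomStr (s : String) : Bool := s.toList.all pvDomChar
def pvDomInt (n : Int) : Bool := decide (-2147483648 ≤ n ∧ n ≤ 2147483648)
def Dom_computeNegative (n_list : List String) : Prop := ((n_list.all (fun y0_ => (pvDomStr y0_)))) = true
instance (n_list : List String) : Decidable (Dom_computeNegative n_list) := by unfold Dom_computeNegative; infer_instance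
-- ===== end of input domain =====

-- B replaces the one-pass accumulator loop with a weighted sum of three count scans (simpler decomposition).

-- ===== PORT A =====
def computeNegative (n_list : List String) : Int :=
  n_list.foldl (fun total item =>
    let answer : Int :=
      if item == "D" then 3
      else if item == "d" then 2
      else if item == "a" then 1
      else 0
    total + answer) 0

-- ===== PORT B =====
def computeNegative_alt (n_list : List String) : Int :=
  (PySem.List.count n_list "D") * 3 + (PySem.List.count n_list "d") * 2 + (PySem.List.count n_list "a")

-- ===== PRECONDITION & SPEC =====
def Spec_computeNegative (n_list : List String) (out : Int) : Prop := out = computeNegative_alt n_list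
instance (n_list : List String) (out : Int) : Decidable (Spec_computeNegative n_list out) := by unfold Spec_computeNegative; infer_instance

-- ===== CLAIM (what is proved, stated in full; the proofs are below) =====
def Claim_equal_computeNegative : Prop := ∀ (n_list : List String), Dom_computeNegative n_list → Spec_computeNegative n_list (computeNegative n_list)

-- ===== LEMMAS AND PROOFS =====

theorem computeNegative_foldl_shift (xs : List String) (t : Int) :
    xs.foldl (fun total item =>
      let answer : Int :=
        if item == "D" then 3
        else if item == "d" then 2
        else if item == "a" then 1
        else 0
      total + answer) t
    = t + (PySem.List.count xs "D") * 3 + (PySem.List.count xs "d") * 2 + (PySem.List.count xs "a") := by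
  induction xs generalizing t with
  | nil => simp [PySem.List.count]
  | cons x xs ih =>
    simp only [List.foldl_cons, ih, PySem.List.count] at *
    by_cases hD : x = "D" <;> by_cases hd : x = "d" <;> by_cases ha : x = "a" <;>
      simp_all [PySem.List.count, List.count_cons] <;> ring

-- ===== VERDICT (by name: the statement is the Claim_ definition above) =====
theorem computeNegative_spec : Claim_equal_computeNegative := by
  intro n_list _
  show _ = _
  unfold computeNegative computeNegative_alt
  rw [computeNegative_foldl_shift]
  ring
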